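-- pv_equiv track=rewrite | github.com/MSPoulaei/Multi-agent-HPO | src/utils/sanitize.py | anonymize_text
-- ===== SOURCE A (Python) =====
-- def anonymize_text(text: str, anonymize: bool = True):
--     if not anonymize or text is None:
--         return text
--     # Replace known names with generic placeholders
--     replacements = {
--         "CIFAR-10": "DatasetX",
--         "CIFAR10": "DatasetX",
--         "ResNet-9": "ModelX",
--         "ResNet9": "ModelX",
--         "ResNet 9": "ModelX",
--     }
--     for k, v in replacements.items():
--         text = text.replace(k, v)
--     return text
-- ===== SOURCE B (Python) =====
-- _REPLACEMENTS = [
--     ("CIFAR-10", "DatasetX"),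
--     ("CIFAR10", "DatasetX"),
--     ("ResNet-9", "ModelX"),
--     ("ResNet9", "ModelX"),
--     ("ResNet 9", "ModelX"),
-- ]
--
--
-- def anonymize_text(text: str, anonymize: bool = True):
--     if not anonymize or text is None:
--         return text
--     # Single pass over the string: at each position emit the placeholder of the
--     # first matching name (names never match at the same position, and
--     # placeholders never re-create a name, so this equals A's sequential passes).
--     out = []
--     i = 0
--     n = len(text)
--     while i < n:
--         for k, v in _REPLACEMENTS:
--             if text.startswith(k, i):
--                 out.append(v)
--                 i += len(k)
--                 break
--         else:
--             out.append(text[i])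
--             i += 1
--     return "".join(out)
-- ===== Notes on version B (the rewrite author's own statement) =====
-- stated objective: alternative
-- what changed: A makes five sequential full-string str.replace passes (one per known name); B builds a match table and does ONE left-to-right scan, emitting the placeholder of the first name matching at the current position or copying the character, relying on the facts that no two names match at the same position and placeholders never re-create a name.
import Mathlib
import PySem

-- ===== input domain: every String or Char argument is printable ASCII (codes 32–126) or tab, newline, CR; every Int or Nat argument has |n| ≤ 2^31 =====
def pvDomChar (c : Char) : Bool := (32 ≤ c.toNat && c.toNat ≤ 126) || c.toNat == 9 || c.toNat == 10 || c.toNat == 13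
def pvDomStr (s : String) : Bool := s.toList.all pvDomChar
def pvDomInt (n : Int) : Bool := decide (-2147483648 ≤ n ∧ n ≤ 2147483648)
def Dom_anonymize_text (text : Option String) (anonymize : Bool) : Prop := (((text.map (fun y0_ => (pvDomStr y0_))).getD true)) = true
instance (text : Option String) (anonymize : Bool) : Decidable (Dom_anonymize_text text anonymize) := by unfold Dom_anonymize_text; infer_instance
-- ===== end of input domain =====

-- B replaces A's five sequential full-string `str.replace` passes by ONE left-to-right
-- scan with a match table (objective: alternative single-pass algorithm, same result).

-- ===== PORT A =====
-- literal port of Source A: guard, then `text = text.replace(k, v)` over the dict's items in order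
def anonymize_text (text : Option String) (anonymize : Bool) : Option String :=
  if !anonymize then text
  else
    match text with
    | none => none
    | some s =>
        some ([("CIFAR-10", "DatasetX"), ("CIFAR10", "DatasetX"), ("ResNet-9", "ModelX"),
               ("ResNet9", "ModelX"), ("ResNet 9", "ModelX")].foldl
          (fun t kv => PySem.Str.replace t kv.1 kv.2) s)

-- ===== PORT B =====
-- the match table of Source B
def pvKeys : List (List Char × List Char) :=
  [("CIFAR-10".toList, "DatasetX".toList), ("CIFAR10".toList, "DatasetX".toList),
   ("ResNet-9".toList, "ModelX".toList), ("ResNet9".toList, "ModelX".toList),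
   ("ResNet 9".toList, "ModelX".toList)]

-- Source B's inner `for k, v in _REPLACEMENTS: if text.startswith(k, i)` (first match wins)
def pvFindKey : List (List Char × List Char) → List Char → Option (List Char × List Char)
  | [], _ => none
  | kv :: rest, l => if kv.1.isPrefixOf l then some kv else pvFindKey rest l

-- Source B's single `while i < n` pass: emit the placeholder of the first matching key and
-- jump past it, else copy one character ("".join(out) = the appends below)
def pvScan (ks : List (List Char × List Char)) (l : List Char) : List Char :=
  match l with
  | [] => []
  | c :: t =>
    match pvFindKey ks (c :: t) with
    | some kv => kv.2 ++ pvScan ks (t.drop (kv.1.length - 1))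
    | none => c :: pvScan ks t
termination_by l.length
decreasing_by all_goals (simp [List.length_drop]; try omega)

def anonymize_text_alt (text : Option String) (anonymize : Bool) : Option String :=
  if !anonymize then text
  else
    match text with
    | none => none
    | some s => some (String.ofList (pvScan pvKeys s.toList))

-- ===== PRECONDITION & SPEC =====
def Spec_anonymize_text (text : Option String) (anonymize : Bool) (out : Option String) : Prop := out = anonymize_text_alt text anonymize
instance (text : Option String) (anonymize : Bool) (out : Option String) : Decidable (Spec_anonymize_text text anonymize out) := by unfold Spec_anonymize_text; infer_instance

-- ===== CLAIM (what is proved, stated in full; the proofs are below) =====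
def Claim_equal_anonymize_text : Prop := ∀ (text : Option String) (anonymize : Bool), Dom_anonymize_text text anonymize → Spec_anonymize_text text anonymize (anonymize_text text anonymize)

-- ===== LEMMAS AND PROOFS =====

-- A's `str.replace old new`, written as the natural front-of-list recursion (old ≠ [])
def pvRepl (old nw : List Char) (l : List Char) : List Char :=
  match l with
  | [] => []
  | c :: t =>
    if old.isPrefixOf (c :: t) then nw ++ pvRepl old nw (t.drop (old.length - 1))
    else c :: pvRepl old nw t
termination_by l.length
decreasing_by all_goals (simp [List.length_drop]; try omega)

lemma pvRepl_nil (old nw : List Char) : pvRepl old nw [] = [] := by rw [pvRepl]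

lemma pvRepl_cons_prefix {old : List Char} (nw : List Char) {c : Char} {t : List Char}
    (h : old.isPrefixOf (c :: t) = true) :
    pvRepl old nw (c :: t) = nw ++ pvRepl old nw (t.drop (old.length - 1)) := by
  rw [pvRepl, if_pos h]

lemma pvRepl_cons_not_prefix {old : List Char} (nw : List Char) {c : Char} {t : List Char}
    (h : ¬ old <+: (c :: t)) :
    pvRepl old nw (c :: t) = c :: pvRepl old nw t := by
  rw [pvRepl, if_neg (fun hb => h (List.isPrefixOf_iff_prefix.mp hb))]

lemma pvReplace_go_eq (old nw : List Char) (hold : old ≠ []) :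
    ∀ (fuel : Nat) (l acc : List Char), l.length ≤ fuel →
      PySem.Chars.replace.go old nw fuel l acc = acc.reverse ++ pvRepl old nw l := by
  intro fuel
  induction fuel with
  | zero =>
      intro l acc h
      have : l = [] := List.eq_nil_of_length_eq_zero (Nat.le_zero.mp h)
      subst this
      simp [PySem.Chars.replace.go, pvRepl_nil]
  | succ n ih =>
      intro l acc h
      match l with
      | [] => simp [PySem.Chars.replace.go, pvRepl_nil]
      | c :: t =>
        rw [PySem.Chars.replace.go]
        by_cases hp : old.isPrefixOf (c :: t)
        · obtain ⟨m, hm⟩ : ∃ m, old.length = m + 1 := by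
            cases old with
            | nil => exact absurd rfl hold
            | cons a b => exact ⟨b.length, rfl⟩
          have hdrop : (c :: t).drop old.length = t.drop (old.length - 1) := by
            rw [hm]; simp
          rw [if_pos hp, hdrop, ih _ _ (by simp at h ⊢; omega)]
          rw [pvRepl_cons_prefix nw hp]
          simp
        · rw [if_neg hp, ih _ _ (by simp at h ⊢; omega)]
          rw [pvRepl_cons_not_prefix nw (fun hpre => hp (List.isPrefixOf_iff_prefix.mpr hpre))]
          simp

lemma pvReplace_eq (old nw l : List Char) (hold : old ≠ []) :
    PySem.Chars.replace l old nw = pvRepl old nw l := by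
  have : old.isEmpty = false := by simpa using hold
  rw [PySem.Chars.replace, this]
  simpa using pvReplace_go_eq old nw hold l.length l [] le_rfl

-- "neither is a prefix of the other"
abbrev pvMism (k u : List Char) : Prop := ¬ k <+: u ∧ ¬ u <+: k

lemma pvMism_not_prefix_append {k u : List Char} (h : pvMism k u) (rest : List Char) :
    ¬ k <+: u ++ rest := by
  intro hk
  rcases Nat.le_total k.length u.length with hle | hle
  · exact h.1 (List.prefix_of_prefix_length_le hk (List.prefix_append u rest) hle)
  · exact h.2 (List.prefix_of_prefix_length_le (List.prefix_append u rest) hk hle)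

lemma pvFindKey_nil (l : List Char) : pvFindKey [] l = none := rfl

lemma pvFindKey_cons (kv : List Char × List Char) (rest : List (List Char × List Char))
    (l : List Char) :
    pvFindKey (kv :: rest) l = if kv.1.isPrefixOf l then some kv else pvFindKey rest l := rfl

lemma pvFindKey_mem {ks : List (List Char × List Char)} {l : List Char}
    {kv : List Char × List Char} (h : pvFindKey ks l = some kv) :
    kv ∈ ks ∧ kv.1 <+: l := by
  induction ks with
  | nil => simp [pvFindKey_nil] at h
  | cons a rest ih =>
      rw [pvFindKey_cons] at h
      by_cases hp : a.1.isPrefixOf l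
      · rw [if_pos hp] at h
        cases h
        exact ⟨by simp, List.isPrefixOf_iff_prefix.mp hp⟩
      · rw [if_neg hp] at h
        obtain ⟨h1, h2⟩ := ih h
        exact ⟨List.mem_cons_of_mem _ h1, h2⟩

lemma pvFindKey_none_iff {ks : List (List Char × List Char)} {l : List Char} :
    pvFindKey ks l = none ↔ ∀ kv ∈ ks, ¬ kv.1 <+: l := by
  induction ks with
  | nil => simp [pvFindKey_nil]
  | cons a rest ih =>
      rw [pvFindKey_cons]
      by_cases hp : a.1.isPrefixOf l
      · simp only [if_pos hp]
        constructor
        · intro h; cases h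
        · intro h
          exact absurd (List.isPrefixOf_iff_prefix.mp hp) (h a (by simp))
      · simp only [if_neg hp, ih]
        constructor
        · intro h kv hm
          rcases List.mem_cons.mp hm with h' | hm'
          · subst h'; exact fun hpre => hp (List.isPrefixOf_iff_prefix.mpr hpre)
          · exact h kv hm'
        · intro h kv hm
          exact h kv (List.mem_cons_of_mem _ hm)

lemma pvFindKey_append_some {S T : List (List Char × List Char)} {l : List Char}
    {kv : List Char × List Char} (h : pvFindKey S l = some kv) :
    pvFindKey (S ++ T) l = some kv := by
  induction S with
  | nil => simp [pvFindKey_nil] at h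
  | cons a rest ih =>
      rw [pvFindKey_cons] at h
      rw [List.cons_append, pvFindKey_cons]
      by_cases hp : a.1.isPrefixOf l
      · rw [if_pos hp] at h ⊢; exact h
      · rw [if_neg hp] at h ⊢; exact ih h

lemma pvFindKey_append_none {S : List (List Char × List Char)} {l : List Char}
    (h : pvFindKey S l = none) (kv : List Char × List Char) :
    pvFindKey (S ++ [kv]) l = if kv.1.isPrefixOf l then some kv else none := by
  induction S with
  | nil => simp [pvFindKey_nil, pvFindKey_cons]
  | cons a rest ih =>
      rw [pvFindKey_cons] at h
      rw [List.cons_append, pvFindKey_cons]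
      by_cases hp : a.1.isPrefixOf l
      · rw [if_pos hp] at h; cases h
      · rw [if_neg hp] at h ⊢; exact ih h

lemma pvScan_keys_nil (ks : List (List Char × List Char)) : pvScan ks [] = [] := by
  rw [pvScan]

lemma pvScan_cons_some {ks : List (List Char × List Char)} {c : Char} {t : List Char}
    {kv : List Char × List Char} (h : pvFindKey ks (c :: t) = some kv) :
    pvScan ks (c :: t) = kv.2 ++ pvScan ks (t.drop (kv.1.length - 1)) := by
  rw [pvScan, h]

lemma pvScan_cons_none {ks : List (List Char × List Char)} {c : Char} {t : List Char}
    (h : pvFindKey ks (c :: t) = none) :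
    pvScan ks (c :: t) = c :: pvScan ks t := by
  rw [pvScan, h]

lemma pvScan_nil_keys (l : List Char) : pvScan [] l = l := by
  induction l with
  | nil => rw [pvScan_keys_nil]
  | cons c t ih => rw [pvScan_cons_none (pvFindKey_nil _), ih]

-- the scan copies a block that no key can match inside
lemma pvScan_stepThrough (S : List (List Char × List Char)) :
    ∀ (u rest : List Char), (∀ u2, u2 <:+ u → u2 ≠ [] → ∀ kv ∈ S, pvMism kv.1 u2) →
      pvScan S (u ++ rest) = u ++ pvScan S rest := by
  intro u
  induction u with
  | nil => intro rest _; simp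
  | cons c u' ih =>
      intro rest hm
      have hnone : pvFindKey S (c :: (u' ++ rest)) = none := by
        rw [pvFindKey_none_iff]
        intro kv hkv
        have := pvMism_not_prefix_append (hm (c :: u') List.suffix_rfl (by simp) kv hkv) rest
        simpa using this
      rw [List.cons_append, pvScan_cons_none hnone,
          ih rest (fun u2 hs hne kv hkv => hm u2 (hs.trans (List.suffix_cons c u')) hne kv hkv)]
      simp

-- the scan never creates a new occurrence of a placeholder-free pattern at the front
lemma pvScan_noCreate (S : List (List Char × List Char))
    (hvne : ∀ kv ∈ S, kv.2 ≠ []) :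
    ∀ (n : Nat) (t : List Char), t.length ≤ n → ∀ (u : List Char), u ≠ [] →
      (∀ c ∈ u, ∀ kv ∈ S, kv.2.head? ≠ some c) → ¬ u <+: t → ¬ u <+: pvScan S t := by
  intro n
  induction n with
  | zero =>
      intro t ht u hu _ hnp
      have : t = [] := List.eq_nil_of_length_eq_zero (Nat.le_zero.mp ht)
      subst this
      rw [pvScan_keys_nil]
      exact hnp
  | succ n ih =>
      intro t ht u hu hav hnp
      match t with
      | [] =>
          rw [pvScan_keys_nil]
          intro hpre
          exact hu (List.prefix_nil.mp hpre)
      | c :: t' =>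
        cases hf : pvFindKey S (c :: t') with
        | some kv =>
            rw [pvScan_cons_some hf]
            obtain ⟨hmem, _⟩ := pvFindKey_mem hf
            intro hpre
            obtain ⟨uh, u', rfl⟩ : ∃ uh u', u = uh :: u' := by
              cases u with
              | nil => exact absurd rfl hu
              | cons a b => exact ⟨a, b, rfl⟩
            obtain ⟨vh, v', hv⟩ : ∃ vh v', kv.2 = vh :: v' := by
              cases hkv2 : kv.2 with
              | nil => exact absurd hkv2 (hvne kv hmem)
              | cons a b => exact ⟨a, b, rfl⟩
            rw [hv, List.cons_append] at hpre
            have h1 := (List.cons_prefix_cons.mp hpre).1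
            have h2 := hav uh (by simp) kv hmem
            rw [hv] at h2
            simp [h1] at h2
        | none =>
            rw [pvScan_cons_none hf]
            intro hpre
            obtain ⟨uh, u', rfl⟩ : ∃ uh u', u = uh :: u' := by
              cases u with
              | nil => exact absurd rfl hu
              | cons a b => exact ⟨a, b, rfl⟩
            obtain ⟨h1, h2⟩ := List.cons_prefix_cons.mp hpre
            subst h1
            match u' with
            | [] => exact hnp (by simp)
            | d :: u'' =>
                have hnp' : ¬ (d :: u'') <+: t' := by
                  intro hp'
                  exact hnp (List.cons_prefix_cons.mpr ⟨rfl, hp'⟩)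
                exact ih t' (by simp at ht; omega) (d :: u'') (by simp)
                  (fun e he kv hkv => hav e (List.mem_cons_of_mem _ he) kv hkv) hnp' h2

-- one replace pass commutes over an already-emitted placeholder block
lemma pvRepl_passVal {k : List Char} (v : List Char) (hk : k ≠ []) :
    ∀ (w X : List Char), (∀ c ∈ w, k.head? ≠ some c) →
      pvRepl k v (w ++ X) = w ++ pvRepl k v X := by
  intro w
  induction w with
  | nil => intro X _; simp
  | cons c w' ih =>
      intro X hw
      obtain ⟨kh, k', rfl⟩ : ∃ kh k', k = kh :: k' := by
        cases k with
        | nil => exact absurd rfl hk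
        | cons a b => exact ⟨a, b, rfl⟩
      have hne : ¬ (kh :: k') <+: (c :: (w' ++ X)) := by
        intro hpre
        have := (List.cons_prefix_cons.mp hpre).1
        exact hw c (by simp) (by simp [this])
      rw [List.cons_append, pvRepl_cons_not_prefix v hne,
          ih X (fun e he => hw e (List.mem_cons_of_mem _ he))]
      simp

-- one replace pass consumes its own key at the front
lemma pvRepl_self_prefix {k : List Char} (v : List Char) (hk : k ≠ []) (X : List Char) :
    pvRepl k v (k ++ X) = v ++ pvRepl k v X := by
  obtain ⟨kh, k', rfl⟩ : ∃ kh k', k = kh :: k' := by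
    cases k with
    | nil => exact absurd rfl hk
    | cons a b => exact ⟨a, b, rfl⟩
  have hpre : (kh :: k').isPrefixOf (kh :: (k' ++ X)) = true :=
    List.isPrefixOf_iff_prefix.mpr ⟨X, by simp⟩
  rw [List.cons_append, pvRepl_cons_prefix v hpre]
  simp

-- one replace pass over the scan of the earlier keys = the scan with the key appended
lemma pvStep (k v : List Char) (S : List (List Char × List Char))
    (hk : k ≠ [])
    (hvne : ∀ kv ∈ S, kv.2 ≠ [])
    (hHead : ∀ kv ∈ S, kv.2.all (fun c => k.head? != some c) = true)
    (hAv : ∀ kv ∈ S, k.all (fun c => kv.2.head? != some c) = true)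
    (hM : ∀ u2 ∈ k.tails, u2 ≠ [] → ∀ kv ∈ S, pvMism kv.1 u2) :
    ∀ (n : Nat) (l : List Char), l.length ≤ n →
      pvRepl k v (pvScan S l) = pvScan (S ++ [(k, v)]) l := by
  have hM' : ∀ u2, u2 <:+ k → u2 ≠ [] → ∀ kv ∈ S, pvMism kv.1 u2 :=
    fun u2 hs => hM u2 ((List.mem_tails _ _).mpr hs)
  intro n
  induction n with
  | zero =>
      intro l hl
      have : l = [] := List.eq_nil_of_length_eq_zero (Nat.le_zero.mp hl)
      subst this
      rw [pvScan_keys_nil, pvScan_keys_nil, pvRepl_nil]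
  | succ n ih =>
      intro l hl
      match l with
      | [] => rw [pvScan_keys_nil, pvScan_keys_nil, pvRepl_nil]
      | c :: t =>
        have ht : t.length ≤ n := by simp at hl; omega
        cases hf : pvFindKey S (c :: t) with
        | some kv =>
            obtain ⟨hmem, _⟩ := pvFindKey_mem hf
            rw [pvScan_cons_some hf, pvScan_cons_some (pvFindKey_append_some hf)]
            rw [pvRepl_passVal v hk kv.2 _
              (fun e he => bne_iff_ne.mp (List.all_eq_true.mp (hHead kv hmem) e he))]
            rw [ih _ (le_trans (by simp) ht)]
        | none =>
            cases hp : k.isPrefixOf (c :: t) with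
            | true =>
                obtain ⟨rest, hrest⟩ := List.isPrefixOf_iff_prefix.mp hp
                obtain ⟨kh, k', rfl⟩ : ∃ kh k', k = kh :: k' := by
                  cases k with
                  | nil => exact absurd rfl hk
                  | cons a b => exact ⟨a, b, rfl⟩
                have hrest' := hrest
                rw [List.cons_append] at hrest'
                injection hrest' with hc htre
                have hf2 : pvFindKey (S ++ [(kh :: k', v)]) (c :: t) = some (kh :: k', v) := by
                  rw [pvFindKey_append_none hf, if_pos hp]
                have hscan : pvScan S (c :: t) = (kh :: k') ++ pvScan S rest := by
                  rw [← hrest, pvScan_stepThrough S (kh :: k') rest hM']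
                rw [hscan, pvRepl_self_prefix v hk (pvScan S rest)]
                rw [ih rest (by
                  have hlen : t.length = k'.length + rest.length := by
                    rw [← htre]; simp
                  omega)]
                rw [pvScan_cons_some hf2]
                have hdrop : t.drop ((kh :: k').length - 1) = rest := by
                  rw [← htre]; simp
                rw [hdrop]
            | false =>
                have hf2 : pvFindKey (S ++ [(k, v)]) (c :: t) = none := by
                  rw [pvFindKey_append_none hf, if_neg (by simp [hp])]
                rw [pvScan_cons_none hf, pvScan_cons_none hf2]
                obtain ⟨kh, k', rfl⟩ : ∃ kh k', k = kh :: k' := by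
                  cases k with
                  | nil => exact absurd rfl hk
                  | cons a b => exact ⟨a, b, rfl⟩
                have hknp : ¬ (kh :: k') <+: (c :: t) :=
                  fun hpre => by rw [List.isPrefixOf_iff_prefix.mpr hpre] at hp; cases hp
                have hnomatch : ¬ (kh :: k') <+: (c :: pvScan S t) := by
                  by_cases hc : kh = c
                  · subst hc
                    have hk'np : ¬ k' <+: t :=
                      fun hpre => hknp (List.cons_prefix_cons.mpr ⟨rfl, hpre⟩)
                    obtain ⟨d, k'', rfl⟩ : ∃ d k'', k' = d :: k'' := by
                      cases k' with
                      | nil => exact absurd (by simp) hk'np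
                      | cons a b => exact ⟨a, b, rfl⟩
                    have := pvScan_noCreate S hvne t.length t le_rfl (d :: k'') (by simp)
                      (fun e he kv hkv =>
                        bne_iff_ne.mp (List.all_eq_true.mp (hAv kv hkv) e
                          (List.mem_cons_of_mem _ he))) hk'np
                    exact fun hpre => this (List.cons_prefix_cons.mp hpre).2
                  · exact fun hpre => hc (List.cons_prefix_cons.mp hpre).1
                rw [pvRepl_cons_not_prefix v hnomatch, ih t ht]

-- the five sequential replace passes of A equal B's one scan over all five keys
set_option maxRecDepth 8192 in
lemma pvChain_eq (cs : List Char) :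
    pvRepl "ResNet 9".toList "ModelX".toList
      (pvRepl "ResNet9".toList "ModelX".toList
        (pvRepl "ResNet-9".toList "ModelX".toList
          (pvRepl "CIFAR10".toList "DatasetX".toList
            (pvRepl "CIFAR-10".toList "DatasetX".toList cs)))) = pvScan pvKeys cs := by
  have h1 := pvStep "CIFAR-10".toList "DatasetX".toList []
    (by decide) (by decide) (by decide) (by decide) (by decide) cs.length cs le_rfl
  rw [pvScan_nil_keys] at h1
  have h2 := pvStep "CIFAR10".toList "DatasetX".toList
    [("CIFAR-10".toList, "DatasetX".toList)]
    (by decide) (by decide) (by decide) (by decide) (by decide) cs.length cs le_rfl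
  have h3 := pvStep "ResNet-9".toList "ModelX".toList
    [("CIFAR-10".toList, "DatasetX".toList), ("CIFAR10".toList, "DatasetX".toList)]
    (by decide) (by decide) (by decide) (by decide) (by decide) cs.length cs le_rfl
  have h4 := pvStep "ResNet9".toList "ModelX".toList
    [("CIFAR-10".toList, "DatasetX".toList), ("CIFAR10".toList, "DatasetX".toList),
     ("ResNet-9".toList, "ModelX".toList)]
    (by decide) (by decide) (by decide) (by decide) (by decide) cs.length cs le_rfl
  have h5 := pvStep "ResNet 9".toList "ModelX".toList
    [("CIFAR-10".toList, "DatasetX".toList), ("CIFAR10".toList, "DatasetX".toList),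
     ("ResNet-9".toList, "ModelX".toList), ("ResNet9".toList, "ModelX".toList)]
    (by decide) (by decide) (by decide) (by decide) (by decide) cs.length cs le_rfl
  simp only [List.nil_append, List.cons_append] at h1 h2 h3 h4 h5
  rw [h1, h2, h3, h4, h5]
  rfl

-- ===== VERDICT (by name: the statement is the Claim_ definition above) =====
theorem anonymize_text_spec : Claim_equal_anonymize_text := by
  unfold Claim_equal_anonymize_text Spec_anonymize_text
  intro text anonymize _
  cases anonymize with
  | false => simp [anonymize_text, anonymize_text_alt]
  | true =>
    cases text with
    | none => simp [anonymize_text, anonymize_text_alt]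
    | some s =>
        have key : ([("CIFAR-10", "DatasetX"), ("CIFAR10", "DatasetX"), ("ResNet-9", "ModelX"),
            ("ResNet9", "ModelX"), ("ResNet 9", "ModelX")].foldl
              (fun t kv => PySem.Str.replace t kv.1 kv.2) s) =
            String.ofList (pvScan pvKeys s.toList) := by
          refine String.toList_inj.mp ?_
          simp only [List.foldl_cons, List.foldl_nil, String.toList_ofList,
            PySem.Str.toList_replace]
          rw [pvReplace_eq "ResNet 9".toList "ModelX".toList _ (by decide)]
          rw [pvReplace_eq "ResNet9".toList "ModelX".toList _ (by decide)]
          rw [pvReplace_eq "ResNet-9".toList "ModelX".toList _ (by decide)]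
          rw [pvReplace_eq "CIFAR10".toList "DatasetX".toList _ (by decide)]
          rw [pvReplace_eq "CIFAR-10".toList "DatasetX".toList _ (by decide)]
          exact pvChain_eq s.toList
        simp [anonymize_text, anonymize_text_alt, key]
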